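-- pv_equiv track=rewrite | github.com/yurrrri/algorithm_solving | 프로그래머스/3/12987. 숫자 게임/숫자 게임.py | solution
-- ===== SOURCE A (Python) =====
-- def solution(A, B):
--     A.sort()     # 차례대로 움직이며 B가 A보다 더 큰 원소를 찾아야하므로, 둘다 오름차순으로 정렬한다.
--     B.sort()
--     answer = 0
--
--     idx_A, idx_B = 0, 0
--     while idx_A < len(A) and idx_B < len(B):
--         if A[idx_A] < B[idx_B]:
--             idx_A += 1   # B가 더 큰 인덱스를 찾았으므로 그 다음 수를 비교하기 위해 idx_A, idx_B 둘다 + 1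
--             idx_B += 1
--             answer += 1
--         else:    # B가 더 큰 인덱스를 찾아다니기 위해 idx_B만 + 1
--             idx_B += 1
--
--     return answer
-- ===== SOURCE B (Python) =====
-- def solution(A, B):
--     # Same in-place ascending sorts as the original (same observable mutation).
--     A.sort()
--     B.sort()
--     m = len(B)
--     # Characterization instead of greedy matching: k wins are possible iff the
--     # k largest B cards beat the k smallest A cards paired in order.  Search
--     # the largest feasible k by verifying that condition directly.
--     k = min(len(A), m)
--     while k > 0 and not all(x < y for x, y in zip(A[:k], B[m - k:])):
--         k -= 1
--     return k
-- ===== Notes on version B (the rewrite author's own statement) =====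
-- stated objective: alternative
-- what changed: Replaces the streaming two-pointer greedy matching by a feasibility characterization: k wins are possible iff the k largest B cards beat the k smallest A cards paired in order, and B searches for the largest k whose pairing verifies, instead of constructing any matching.
import Mathlib
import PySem

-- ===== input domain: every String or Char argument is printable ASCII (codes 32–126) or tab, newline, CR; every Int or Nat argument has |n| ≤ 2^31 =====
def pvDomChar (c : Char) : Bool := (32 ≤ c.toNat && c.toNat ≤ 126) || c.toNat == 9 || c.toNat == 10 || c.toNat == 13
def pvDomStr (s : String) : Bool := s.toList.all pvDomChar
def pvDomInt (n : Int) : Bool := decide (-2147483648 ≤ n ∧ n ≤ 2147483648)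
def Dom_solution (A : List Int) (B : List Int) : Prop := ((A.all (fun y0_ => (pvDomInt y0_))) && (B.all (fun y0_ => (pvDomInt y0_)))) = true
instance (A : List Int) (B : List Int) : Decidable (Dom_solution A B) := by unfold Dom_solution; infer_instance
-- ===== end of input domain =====

-- B replaces A's streaming two-pointer greedy by a feasibility search: it returns the
-- largest k whose pairing "k largest B cards beat k smallest A cards in order" verifies
-- (objective: alternative). Both Pythons sort A and B in place identically; the
-- equivalence proved here is about the return value.

-- ===== PORT A =====
-- A's while loop with front pointers idx_A/idx_B: the obvious structural recursion on the
-- two suffixes; advancing an index = consuming a head.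
def loopA : List Int → List Int → Int
  | x :: xs, y :: ys => if x < y then 1 + loopA xs ys else loopA (x :: xs) ys
  | _, _ => 0

def solution (A : List Int) (B : List Int) : Int :=
  loopA (PySem.List.sorted A (fun x => x) false) (PySem.List.sorted B (fun x => x) false)

-- ===== PORT B =====
-- Source B's `all(x < y for x, y in zip(A[:k], B[m-k:]))`
def checkB (a b : List Int) (k : Nat) : Bool :=
  ((a.take k).zip (b.drop (b.length - k))).all (fun p => p.1 < p.2)

-- Source B's while loop decrementing k until the check passes or k = 0
def scanB (a b : List Int) : Nat → Int
  | 0 => 0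
  | k + 1 => if checkB a b (k + 1) then ((k : Int) + 1) else scanB a b k

def solution_alt (A : List Int) (B : List Int) : Int :=
  scanB (PySem.List.sorted A (fun x => x) false) (PySem.List.sorted B (fun x => x) false)
    (min (PySem.List.sorted A (fun x => x) false).length
         (PySem.List.sorted B (fun x => x) false).length)

-- ===== PRECONDITION & SPEC =====
def Spec_solution (A : List Int) (B : List Int) (out : Int) : Prop := out = solution_alt A B
instance (A : List Int) (B : List Int) (out : Int) : Decidable (Spec_solution A B out) := by unfold Spec_solution; infer_instance

-- ===== CLAIM (what is proved, stated in full; the proofs are below) =====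
def Claim_equal_solution : Prop := ∀ (A : List Int) (B : List Int), Dom_solution A B → Spec_solution A B (solution A B)

-- ===== LEMMAS AND PROOFS =====

theorem loopA_nil_right (a : List Int) : loopA a [] = 0 := by
  cases a <;> simp [loopA]

-- dropping the maximal a-card when no b-card beats it does not change the count
theorem loopA_drop_max (b : List Int) : ∀ (a : List Int) (x : Int),
    (∀ z ∈ b, z ≤ x) → loopA (a ++ [x]) b = loopA a b := by
  induction b with
  | nil => intro a x _; simp [loopA_nil_right]
  | cons z zs ih =>
    intro a x hle
    cases a with
    | nil =>
      have hzx : ¬ x < z := not_lt.mpr (hle z (by simp))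
      simp only [List.nil_append, loopA, if_neg hzx]
      have := ih [] x (fun w hw => hle w (by simp [hw]))
      simpa [loopA] using this
    | cons w ws =>
      by_cases hwz : w < z
      · simp only [List.cons_append, loopA, if_pos hwz]
        rw [ih ws x (fun u hu => hle u (by simp [hu]))]
      · simp only [List.cons_append, loopA, if_neg hwz]
        have := ih (w :: ws) x (fun u hu => hle u (by simp [hu]))
        simpa [loopA] using this

-- when the maximal b-card beats the maximal a-card, they can be matched last
theorem loopA_match_max (b : List Int) : ∀ (a : List Int) (x y : Int),
    x < y → (∀ z ∈ a, z ≤ x) → (∀ z ∈ b, z ≤ y) →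
    loopA (a ++ [x]) (b ++ [y]) = 1 + loopA a b := by
  induction b with
  | nil =>
    intro a x y hxy ha _
    cases a with
    | nil => simp [loopA, hxy]
    | cons w ws =>
      have hwy : w < y := lt_of_le_of_lt (ha w (by simp)) hxy
      simp [loopA, hwy, loopA_nil_right]
  | cons z zs ih =>
    intro a x y hxy ha hb
    cases a with
    | nil =>
      by_cases hxz : x < z
      · simp [loopA, hxz]
      · simp only [List.nil_append, List.cons_append, loopA, if_neg hxz]
        have := ih [] x y hxy (by simp) (fun u hu => hb u (by simp [hu]))
        simpa [loopA] using this
    | cons w ws =>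
      by_cases hwz : w < z
      · have h2 := ih ws x y hxy (fun u hu => ha u (by simp [hu]))
          (fun u hu => hb u (by simp [hu]))
        simp [loopA, hwz, h2]
      · have h2 := ih (w :: ws) x y hxy ha (fun u hu => hb u (by simp [hu]))
        simp only [List.cons_append] at h2 ⊢
        simp [loopA, hwz, h2]

-- scanB only looks at the checks from 1 up to its bound
theorem scanB_congr (a b a2 b2 : List Int) : ∀ (j : Nat),
    (∀ k, 1 ≤ k → k ≤ j → checkB a b k = checkB a2 b2 k) →
    scanB a b j = scanB a2 b2 j := by
  intro j
  induction j with
  | zero => intro _; simp [scanB]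
  | succ j ih =>
    intro h
    simp only [scanB, h (j+1) (by omega) (le_refl _)]
    rw [ih (fun k h1 h2 => h k h1 (by omega))]

-- dropping a's maximum does not change a check that stays within a'
theorem checkB_drop (a' b : List Int) (x : Int) (k : Nat) (hk : k ≤ a'.length) :
    checkB (a' ++ [x]) b k = checkB a' b k := by
  unfold checkB
  rw [List.take_append_of_le_length hk]

-- with both maxima present and y ≤ x, the full pairing fails on its last pair
theorem checkB_top_fail (a' b' : List Int) (x y : Int) (hyx : y ≤ x)
    (hlen : a'.length ≤ b'.length) :
    checkB (a' ++ [x]) (b' ++ [y]) (a'.length + 1) = false := by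
  unfold checkB
  have h1 : (a' ++ [x]).take (a'.length + 1) = a' ++ [x] := by
    apply List.take_of_length_le; simp
  have h2 : (b' ++ [y]).length - (a'.length + 1) = b'.length - a'.length := by
    simp
  have h3 : (b' ++ [y]).drop (b'.length - a'.length) =
      b'.drop (b'.length - a'.length) ++ [y] := by
    rw [List.drop_append_of_le_length (by omega)]
  rw [h1, h2, h3, List.zip_append (by simp [List.length_drop]; omega)]
  simp only [List.all_append]
  have : ¬ x < y := not_lt.mpr hyx
  simp [this]

-- with y the maximum of b and x < y dominating a', check (k+1) on the extended
-- lists reduces to check k on the trimmed ones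
theorem checkB_shift (a' b' : List Int) (x y : Int) (hxy : x < y)
    (ha : ∀ z ∈ a', z ≤ x) (k : Nat) (hka : k ≤ a'.length) (hkb : k ≤ b'.length) :
    checkB (a' ++ [x]) (b' ++ [y]) (k + 1) = checkB a' b' k := by
  unfold checkB
  have h2 : (b' ++ [y]).length - (k + 1) = b'.length - k := by simp
  have h3 : (b' ++ [y]).drop (b'.length - k) = b'.drop (b'.length - k) ++ [y] := by
    rw [List.drop_append_of_le_length (by omega)]
  -- the (k+1)-th smallest a-card (0-based index k in a' ++ [x]) exists and is ≤ x
  have hklt : k < (a' ++ [x]).length := by simp; omega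
  have h1 : (a' ++ [x]).take (k + 1) = a'.take k ++ [(a' ++ [x])[k]] := by
    rw [List.take_add_one, List.take_append_of_le_length hka]
    simp [List.getElem?_eq_getElem hklt]
  have hux : (a' ++ [x])[k] ≤ x := by
    have hmem : (a' ++ [x])[k] ∈ a' ++ [x] := List.getElem_mem hklt
    rcases List.mem_append.mp hmem with h | h
    · exact ha _ h
    · simp at h; omega
  rw [h1, h2, h3, List.zip_append (by simp [List.length_take, List.length_drop]; omega)]
  simp only [List.all_append]
  have : (a' ++ [x])[k] < y := lt_of_le_of_lt hux hxy
  simp [this]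

theorem scanB_succ (a b : List Int) (k : Nat) :
    scanB a b (k + 1) = if checkB a b (k + 1) then ((k : Int) + 1) else scanB a b k := rfl

-- Source B's descending scan, shifted by one matched pair
theorem scanB_shift (a' b' : List Int) (x y : Int) (hxy : x < y)
    (ha : ∀ z ∈ a', z ≤ x) : ∀ (j : Nat), j ≤ a'.length → j ≤ b'.length →
    scanB (a' ++ [x]) (b' ++ [y]) (j + 1) = 1 + scanB a' b' j := by
  intro j
  induction j with
  | zero =>
    intro _ _
    have h0 : checkB (a' ++ [x]) (b' ++ [y]) 1 = true := by
      rw [checkB_shift a' b' x y hxy ha 0 (by omega) (by omega)]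
      simp [checkB]
    simp [scanB, h0]
  | succ j ih =>
    intro hja hjb
    have hc := checkB_shift a' b' x y hxy ha (j + 1) hja hjb
    rw [scanB_succ, hc, scanB_succ a' b' j]
    by_cases h : checkB a' b' (j + 1) = true
    · simp [h]; ring
    · simp only [h, if_false, Bool.false_eq_true]
      rw [ih (by omega) (by omega)]

-- main bridge: on ascending lists the greedy count equals the largest verified pairing
theorem loopA_eq_scanB : ∀ (n : Nat) (a b : List Int), a.length + b.length ≤ n →
    a.Pairwise (· ≤ ·) → b.Pairwise (· ≤ ·) →
    loopA a b = scanB a b (min a.length b.length) := by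
  intro n
  induction n with
  | zero =>
    intro a b hlen _ _
    have : a = [] ∧ b = [] := by
      constructor <;> (apply List.eq_nil_of_length_eq_zero; omega)
    simp [this.1, this.2, loopA, scanB]
  | succ n ih =>
    intro a b hlen hpa hpb
    rcases List.eq_nil_or_concat b with hb | ⟨b', y, hb⟩
    · simp [hb, loopA_nil_right, scanB]
    rw [List.concat_eq_append] at hb; subst hb
    rcases List.eq_nil_or_concat a with ha | ⟨a', x, ha⟩
    · subst ha
      have : loopA [] (b' ++ [y]) = 0 := by cases b' <;> simp [loopA]
      simp [this, scanB]
    rw [List.concat_eq_append] at ha; subst ha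
    have hax : ∀ z ∈ a', z ≤ x := by
      have := (List.pairwise_append.mp hpa).2.2
      intro z hz; simpa using this z hz x (by simp)
    have hpa' : a'.Pairwise (· ≤ ·) := (List.pairwise_append.mp hpa).1
    have hby : ∀ z ∈ b', z ≤ y := by
      have := (List.pairwise_append.mp hpb).2.2
      intro z hz; simpa using this z hz y (by simp)
    have hpb' : b'.Pairwise (· ≤ ·) := (List.pairwise_append.mp hpb).1
    by_cases hxy : x < y
    · -- match the two maxima
      rw [loopA_match_max b' a' x y hxy hax hby]
      have hmin : min (a' ++ [x]).length (b' ++ [y]).length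
          = min a'.length b'.length + 1 := by simp
      rw [hmin, scanB_shift a' b' x y hxy hax (min a'.length b'.length)
            (by omega) (by omega),
          ih a' b' (by simp at hlen; omega) hpa' hpb']
    · -- x is beaten by nothing: drop it
      have hbx : ∀ z ∈ b' ++ [y], z ≤ x := by
        intro z hz
        rcases List.mem_append.mp hz with h | h
        · exact le_trans (hby z h) (by omega)
        · simp at h; omega
      rw [loopA_drop_max (b' ++ [y]) a' x hbx]
      have hrec := ih a' (b' ++ [y])
        (by simp only [List.length_append, List.length_cons, List.length_nil] at hlen ⊢; omega)
        hpa' hpb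
      rw [hrec]
      by_cases hl : a'.length ≤ b'.length
      · -- the full pairing fails at the top, then a's max is invisible
        have hmin : min (a' ++ [x]).length (b' ++ [y]).length = a'.length + 1 := by
          simp; omega
        have hmin' : min a'.length (b' ++ [y]).length = a'.length := by simp; omega
        rw [hmin, hmin']
        simp only [scanB, checkB_top_fail a' b' x y (by omega) hl]
        simp only [Bool.false_eq_true, if_false]
        exact (scanB_congr _ _ _ _ a'.length
          (fun k _ h2 => checkB_drop a' (b' ++ [y]) x k (by omega))).symm
      · have hmin : min (a' ++ [x]).length (b' ++ [y]).length = b'.length + 1 := by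
          simp; omega
        have hmin' : min a'.length (b' ++ [y]).length = b'.length + 1 := by simp; omega
        rw [hmin, hmin']
        exact (scanB_congr _ _ _ _ (b'.length + 1)
          (fun k _ h2 => checkB_drop a' (b' ++ [y]) x k (by omega))).symm

-- ===== VERDICT (by name: the statement is the Claim_ definition above) =====
theorem solution_spec : Claim_equal_solution := by
  intro A B _
  unfold Spec_solution solution solution_alt
  have ha := PySem.List.sorted_pairwise (xs := A) (key := fun x : Int => x)
  have hb := PySem.List.sorted_pairwise (xs := B) (key := fun x : Int => x)
  exact loopA_eq_scanB _ _ _ (le_refl _) (by simpa using ha) (by simpa using hb)
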